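-- pv_equiv track=rewrite | github.com/BryanWieschenberg/DSA-Collection | Sorter.py | gravity
-- ===== SOURCE A (Python) =====
-- def gravity(nums):
--     n = len(nums)
--     if n <= 1:
--         return
--     max_val = max(nums)
--     level_counts = [0] * max_val
--     for i in range(n):
--         for h in range(nums[i]):
--             level_counts[h] += 1
--             yield i, i
--     for i in range(n):
--         nums[i] = 0
--         yield i, i
--     for col in range(n - 1, -1, -1):
--         height = 0
--         for h in range(max_val):
--             if level_counts[h] > 0:
--                 level_counts[h] -= 1
--                 height += 1
--                 nums[col] = height
--                 yield col, col
-- ===== SOURCE B (Python) =====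
-- def gravity(nums):
--     n = len(nums)
--     if n <= 1:
--         return
--     counts = sorted(nums)
--     for i in range(n):
--         for _ in range(nums[i]):
--             yield i, i
--     for i in range(n):
--         nums[i] = 0
--         yield i, i
--     for col in range(n - 1, -1, -1):
--         for height in range(1, counts[col] + 1):
--             nums[col] = height
--             yield col, col
-- ===== Notes on version B (the rewrite author's own statement) =====
-- stated objective: simpler
-- what changed: Phase 3 no longer simulates bead drops with a level_counts occupancy table rescanned max(nums) times per column; B snapshots counts = sorted(nums) up front and emits counts[col] steps per column directly, dropping the table and the max_val inner scan entirely.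
import Mathlib
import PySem

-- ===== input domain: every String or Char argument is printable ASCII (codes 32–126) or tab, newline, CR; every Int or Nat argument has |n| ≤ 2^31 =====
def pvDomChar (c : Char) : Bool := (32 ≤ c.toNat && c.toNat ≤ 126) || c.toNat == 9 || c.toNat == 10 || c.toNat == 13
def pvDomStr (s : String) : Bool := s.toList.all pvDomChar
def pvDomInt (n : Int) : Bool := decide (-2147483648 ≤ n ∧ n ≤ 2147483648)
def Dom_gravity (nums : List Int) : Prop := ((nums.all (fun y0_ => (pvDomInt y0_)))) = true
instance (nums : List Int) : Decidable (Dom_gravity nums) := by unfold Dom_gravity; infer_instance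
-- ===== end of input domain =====

-- B replaces A's bead-drop simulation (level_counts table rescanned max(nums) times per column)
-- by a sorted(nums) snapshot emitting counts[col] steps per column: simpler, same yield stream.
-- Both Pythons mutate nums identically in place; the equivalence proved here is about the
-- yielded stream (the returned list), as in both sources.

-- ===== PORT A =====
def gravity (nums : List Int) : List (Int × Int) :=
  let n : Int := nums.length
  if n ≤ 1 then [] else
    let maxVal : Int := (PySem.List.max? nums (fun x => x)).getD 0
    let lc0 : List Int := PySem.List.pyRepeat [0] maxVal
    let s1 :=
      (PySem.List.pyRange 0 n).foldl (fun (st : List Int × List (Int × Int)) i =>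
        (PySem.List.pyRange 0 (PySem.List.pyGetD nums i 0)).foldl
          (fun (st : List Int × List (Int × Int)) h =>
            (PySem.List.pySetD st.1 h (PySem.List.pyGetD st.1 h 0 + 1), st.2 ++ [(i, i)])) st)
        (lc0, ([] : List (Int × Int)))
    -- phase 2: 'nums[i] = 0' mutates only the argument, never read again; only the yield remains
    let s2 := (PySem.List.pyRange 0 n).foldl (fun out i => out ++ [(i, i)]) s1.2
    -- phase 3: 'height' and 'nums[col] = height' affect only the argument, not the stream
    ((PySem.List.pyRange (n - 1) (-1) (-1)).foldl (fun (st : List Int × List (Int × Int)) col =>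
        (PySem.List.pyRange 0 maxVal).foldl (fun (st : List Int × List (Int × Int)) h =>
          if 0 < PySem.List.pyGetD st.1 h 0 then
            (PySem.List.pySetD st.1 h (PySem.List.pyGetD st.1 h 0 - 1), st.2 ++ [(col, col)])
          else st) st)
      (s1.1, s2)).2

-- ===== PORT B =====
def gravity_alt (nums : List Int) : List (Int × Int) :=
  let n : Int := nums.length
  if n ≤ 1 then [] else
    let counts : List Int := PySem.List.sorted nums (fun x => x) false
    let o1 :=
      (PySem.List.pyRange 0 n).foldl (fun out i =>
        (PySem.List.pyRange 0 (PySem.List.pyGetD nums i 0)).foldl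
          (fun out _ => out ++ [(i, i)]) out) ([] : List (Int × Int))
    -- phase 2: 'nums[i] = 0' mutates only the argument; only the yield remains
    let o2 := (PySem.List.pyRange 0 n).foldl (fun out i => out ++ [(i, i)]) o1
    -- phase 3: 'nums[col] = height' mutates only the argument; only the yield remains
    (PySem.List.pyRange (n - 1) (-1) (-1)).foldl (fun out col =>
      (PySem.List.pyRange 1 (PySem.List.pyGetD counts col 0 + 1)).foldl
        (fun out _ => out ++ [(col, col)]) out) o2

-- ===== PRECONDITION & SPEC =====
def Spec_gravity (nums : List Int) (out : List (Int × Int)) : Prop := out = gravity_alt nums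
instance (nums : List Int) (out : List (Int × Int)) : Decidable (Spec_gravity nums out) := by unfold Spec_gravity; infer_instance

-- ===== CLAIM (what is proved, stated in full; the proofs are below) =====
def Claim_equal_gravity : Prop := ∀ (nums : List Int), Dom_gravity nums → Spec_gravity nums (gravity nums)

-- ===== LEMMAS AND PROOFS =====

-- level_counts after phase 1, as a function of the beads seen so far: entry h counts beads taller than h
def pvLevels (p : List Int) (M : Nat) : List Int :=
  (List.range M).map (fun h : Nat => ((p.countP (fun x => decide ((h : Int) < x)) : Nat) : Int))

theorem pv_bump_map_nat (g : Nat → Int) (M j : Nat) (hj : j ≤ M) :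
    (PySem.List.pyRange 0 (j : Int)).foldl
      (fun lc h => PySem.List.pySetD lc h (PySem.List.pyGetD lc h 0 + 1)) ((List.range M).map g)
    = (List.range M).map (fun h => g h + if (h : Int) < (j : Int) then 1 else 0) := by
  induction j with
  | zero =>
    rw [PySem.List.pyRange_one_eq_nil (by omega)]
    simp only [List.foldl_nil]
    apply List.map_congr_left
    intro h hmem
    rw [if_neg (by omega)]
    omega
  | succ j ih =>
    have hj' : j ≤ M := by omega
    push_cast
    rw [PySem.List.pyRange_one_succ_right (by positivity), List.foldl_concat, ih hj']
    have hjM : j < M := by omega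
    rw [PySem.List.pyGetD_natCast, PySem.List.pySetD_natCast]
    rw [List.getD_eq_getElem?_getD]
    simp only [List.getElem?_map, List.getElem?_range, hjM, Option.map_some,
      Option.getD_some]
    apply List.ext_getElem
    · simp
    · intro i hi1 hi2
      simp only [List.length_set, List.length_map, List.length_range] at hi1
      simp only [List.getElem_set, List.getElem_map, List.getElem_range]
      by_cases hij : j = i
      · subst hij
        rw [if_pos rfl, if_neg (by omega), if_pos (by omega)]
        ring
      · rw [if_neg hij]
        by_cases hlt : (i : Int) < (j : Int)
        · rw [if_pos hlt, if_pos (by omega)]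
        · rw [if_neg hlt, if_neg (by omega)]

theorem pv_bump_map (g : Nat → Int) (M : Nat) (k : Int) (hk : k ≤ (M : Int)) :
    (PySem.List.pyRange 0 k).foldl
      (fun lc h => PySem.List.pySetD lc h (PySem.List.pyGetD lc h 0 + 1)) ((List.range M).map g)
    = (List.range M).map (fun h => g h + if (h : Int) < k then 1 else 0) := by
  by_cases hk0 : k ≤ 0
  · rw [PySem.List.pyRange_one_eq_nil hk0]
    simp only [List.foldl_nil]
    apply List.map_congr_left
    intro h hmem
    rw [if_neg (by omega)]
    omega
  · have hkt : k = ((k.toNat : Nat) : Int) := by omega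
    rw [hkt]
    exact pv_bump_map_nat g M k.toNat (by omega)

theorem pv_phase1_lc (l : List Int) (M : Nat) (hall : ∀ x ∈ l, x ≤ (M : Int)) :
    l.foldl (fun lc v => (PySem.List.pyRange 0 v).foldl
        (fun lc h => PySem.List.pySetD lc h (PySem.List.pyGetD lc h 0 + 1)) lc)
      ((List.range M).map (fun _ => (0 : Int)))
    = pvLevels l M := by
  induction l using List.reverseRecOn with
  | nil =>
    unfold pvLevels
    simp
  | append_singleton l k ih =>
    rw [List.foldl_concat, ih (fun x hx => hall x (by simp [hx]))]
    unfold pvLevels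
    rw [pv_bump_map _ M k (hall k (by simp))]
    apply List.map_congr_left
    intro h hmem
    rw [List.countP_append, List.countP_singleton]
    push_cast
    by_cases hlt : (h : Int) < k
    · rw [if_pos hlt, if_pos (by simpa using hlt)]
    · rw [if_neg hlt, if_neg (by simpa using hlt)]

theorem pv_inner_aux (g : Nat → Int) (M : Nat) (a c : Int) (out : List (Int × Int))
    (hg : ∀ h : Nat, h < M → (0 < g h ↔ (h : Int) < a)) (j : Nat) (hj : j ≤ M) :
    (PySem.List.pyRange 0 (j : Int)).foldl
      (fun (st : List Int × List (Int × Int)) h =>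
        if 0 < PySem.List.pyGetD st.1 h 0 then
          (PySem.List.pySetD st.1 h (PySem.List.pyGetD st.1 h 0 - 1), st.2 ++ [(c, c)])
        else st)
      ((List.range M).map g, out)
    = ((List.range M).map (fun h => g h - if (h : Int) < min (j : Int) a then 1 else 0),
       out ++ List.replicate (min j a.toNat) (c, c)) := by
  induction j with
  | zero =>
    rw [PySem.List.pyRange_one_eq_nil (by omega)]
    simp only [List.foldl_nil, Nat.cast_zero]
    have h1 : min (0 : Nat) a.toNat = 0 := by omega
    rw [h1]
    simp only [List.replicate_zero, List.append_nil]
    refine Prod.ext ?_ rfl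
    simp only []
    apply List.map_congr_left
    intro h hmem
    rw [if_neg (by omega)]
    omega
  | succ j ih =>
    have hjM : j < M := by omega
    push_cast
    rw [PySem.List.pyRange_one_succ_right (by positivity), List.foldl_concat, ih (by omega)]
    have hget : PySem.List.pyGetD
        ((List.range M).map (fun h => g h - if (h : Int) < min (j : Int) a then 1 else 0)) (j : Int) 0
        = g j := by
      rw [PySem.List.pyGetD_natCast, List.getD_eq_getElem?_getD]
      simp only [List.getElem?_map, List.getElem?_range, hjM, Option.map_some, Option.getD_some]
      rw [if_neg (by omega)]
      ring
    simp only [hget]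
    by_cases hja : (j : Int) < a
    · rw [if_pos ((hg j hjM).mpr hja)]
      refine Prod.ext ?_ ?_
      · simp only []
        rw [PySem.List.pySetD_natCast]
        apply List.ext_getElem
        · simp
        · intro i hi1 hi2
          simp only [List.length_set, List.length_map, List.length_range] at hi1
          simp only [List.getElem_set, List.getElem_map, List.getElem_range]
          by_cases hij : j = i
          · subst hij
            rw [if_pos rfl, if_pos (by omega)]
          · rw [if_neg hij]
            by_cases hlt : (i : Int) < min (j : Int) a
            · rw [if_pos hlt, if_pos (by omega)]
            · rw [if_neg hlt, if_neg (by omega)]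
      · simp only []
        have h2 : min (j + 1) a.toNat = min j a.toNat + 1 := by omega
        rw [h2, List.replicate_succ', ← List.append_assoc]
    · rw [if_neg (by rw [hg j hjM]; exact hja)]
      have h2 : min (j + 1) a.toNat = min j a.toNat := by omega
      rw [h2]
      refine Prod.ext ?_ rfl
      simp only []
      apply List.map_congr_left
      intro h hmem
      by_cases hlt : (h : Int) < min (j : Int) a
      · rw [if_pos hlt, if_pos (by omega)]
      · rw [if_neg hlt, if_neg (by omega)]

theorem pv_inner_col (g : Nat → Int) (M : Nat) (a c : Int) (out : List (Int × Int))
    (ha : a ≤ (M : Int)) (hg : ∀ h : Nat, h < M → (0 < g h ↔ (h : Int) < a)) :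
    (PySem.List.pyRange 0 (M : Int)).foldl
      (fun (st : List Int × List (Int × Int)) h =>
        if 0 < PySem.List.pyGetD st.1 h 0 then
          (PySem.List.pySetD st.1 h (PySem.List.pyGetD st.1 h 0 - 1), st.2 ++ [(c, c)])
        else st)
      ((List.range M).map g, out)
    = ((List.range M).map (fun h => g h - if (h : Int) < a then 1 else 0),
       out ++ List.replicate a.toNat (c, c)) := by
  rw [pv_inner_aux g M a c out hg M (le_refl M)]
  have h1 : min M a.toNat = a.toNat := by omega
  rw [h1]
  refine Prod.ext ?_ rfl
  simp only []
  apply List.map_congr_left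
  intro h hmem
  by_cases hlt : (h : Int) < a
  · rw [if_pos (by simp at hmem; omega), if_pos hlt]
  · rw [if_neg (by omega), if_neg hlt]

theorem pv_outer (s : List Int) (M : Nat) (hs : s.Pairwise (· ≤ ·))
    (helem : ∀ x ∈ s, x ≤ (M : Int)) (c : Nat) (hc : c ≤ s.length) (out : List (Int × Int)) :
    ((PySem.List.pyRange ((c : Int) - 1) (-1) (-1)).foldl
      (fun (st : List Int × List (Int × Int)) col =>
        (PySem.List.pyRange 0 (M : Int)).foldl
          (fun (st : List Int × List (Int × Int)) h =>
            if 0 < PySem.List.pyGetD st.1 h 0 then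
              (PySem.List.pySetD st.1 h (PySem.List.pyGetD st.1 h 0 - 1), st.2 ++ [(col, col)])
            else st) st)
      (pvLevels (s.take c) M, out)).2
    = (PySem.List.pyRange ((c : Int) - 1) (-1) (-1)).foldl
        (fun out col =>
          (PySem.List.pyRange 1 (PySem.List.pyGetD s col 0 + 1)).foldl
            (fun out _ => out ++ [(col, col)]) out) out := by
  induction c generalizing out with
  | zero =>
    rw [PySem.List.pyRange_neg_one_eq_nil (by omega)]
    simp
  | succ c ih =>
    have hcs : c < s.length := by omega
    have hc1 : (((c + 1 : Nat) : Int)) - 1 = (c : Int) := by push_cast; ring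
    rw [hc1, PySem.List.pyRange_neg_one_cons (by omega)]
    simp only [List.foldl_cons]
    have htake : s.take (c + 1) = s.take c ++ [s[c]] := by
      rw [List.take_add_one, List.getElem?_eq_getElem hcs]
      rfl
    have hmemT : ∀ x ∈ s.take (c + 1), x ≤ s[c] := by
      intro x hx
      rw [htake, List.mem_append] at hx
      rcases hx with hx | hx
      · have hp : (s.take c ++ [s[c]]).Pairwise (· ≤ ·) := by
          rw [← htake]; exact hs.sublist (List.take_sublist _ _)
        exact (List.pairwise_append.mp hp).2.2 x hx s[c] (List.mem_singleton_self _)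
      · simp at hx; omega
    have ha : s[c] ≤ (M : Int) := helem _ (List.getElem_mem hcs)
    have hg : ∀ h : Nat, h < M →
        (0 < (((s.take (c + 1)).countP (fun x => decide ((h : Int) < x)) : Nat) : Int) ↔
          (h : Int) < s[c]) := by
      intro h _
      constructor
      · intro hpos
        have : 0 < (s.take (c + 1)).countP (fun x => decide ((h : Int) < x)) := by
          exact_mod_cast hpos
        obtain ⟨x, hxmem, hxp⟩ := List.countP_pos_iff.mp this
        have h1 : (h : Int) < x := by simpa using hxp
        have h2 := hmemT x hxmem
        omega
      · intro hlt
        have : 0 < (s.take (c + 1)).countP (fun x => decide ((h : Int) < x)) := by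
          apply List.countP_pos_iff.mpr
          have hmem : s[c] ∈ s.take (c + 1) := by
            rw [htake]; exact List.mem_append_right _ (List.mem_singleton_self _)
          exact ⟨s[c], hmem, by simpa using hlt⟩
        exact_mod_cast this
    rw [show pvLevels (s.take (c + 1)) M =
        (List.range M).map
          (fun h : Nat => (((s.take (c + 1)).countP (fun x => decide ((h : Int) < x)) : Nat) : Int))
      from rfl]
    rw [pv_inner_col _ M s[c] (c : Int) out ha hg]
    have hlevels : (List.range M).map
        (fun h : Nat => (((s.take (c + 1)).countP (fun x => decide ((h : Int) < x)) : Nat) : Int)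
          - if (h : Int) < s[c] then 1 else 0)
        = pvLevels (s.take c) M := by
      apply List.map_congr_left
      intro h _
      rw [htake, List.countP_append, List.countP_singleton]
      by_cases hlt : (h : Int) < s[c]
      · rw [if_pos hlt, if_pos (by simpa using hlt)]
        push_cast
        ring
      · rw [if_neg hlt, if_neg (by simpa using hlt)]
        push_cast
        ring
    rw [hlevels, ih (by omega)]
    congr 1
    have hsget : PySem.List.pyGetD s (c : Int) 0 = s[c] := by
      rw [PySem.List.pyGetD_natCast, List.getD_eq_getElem?_getD, List.getElem?_eq_getElem hcs]
      rfl
    rw [hsget, PySem.List.foldl_append_singleton_eq_map (fun _ => ((c : Int), (c : Int)))]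
    congr 1
    rw [List.map_const']
    congr 1
    rw [PySem.List.length_pyRange_one]
    congr 1
    ring

-- the phase-1 pair-state fold splits into independent level_counts and output folds
theorem pv_prod_split (nums : List Int) (n : Int) (lc0 : List Int) :
    (PySem.List.pyRange 0 n).foldl (fun (st : List Int × List (Int × Int)) i =>
      (PySem.List.pyRange 0 (PySem.List.pyGetD nums i 0)).foldl
        (fun (st : List Int × List (Int × Int)) h =>
          (PySem.List.pySetD st.1 h (PySem.List.pyGetD st.1 h 0 + 1), st.2 ++ [(i, i)])) st)
      (lc0, ([] : List (Int × Int)))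
    = ((PySem.List.pyRange 0 n).foldl (fun lc i =>
        (PySem.List.pyRange 0 (PySem.List.pyGetD nums i 0)).foldl
          (fun lc h => PySem.List.pySetD lc h (PySem.List.pyGetD lc h 0 + 1)) lc) lc0,
       (PySem.List.pyRange 0 n).foldl (fun out i =>
        (PySem.List.pyRange 0 (PySem.List.pyGetD nums i 0)).foldl
          (fun out _ => out ++ [(i, i)]) out) ([] : List (Int × Int))) := by
  have hbody : (fun (st : List Int × List (Int × Int)) (i : Int) =>
      (PySem.List.pyRange 0 (PySem.List.pyGetD nums i 0)).foldl
        (fun (st : List Int × List (Int × Int)) h =>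
          (PySem.List.pySetD st.1 h (PySem.List.pyGetD st.1 h 0 + 1), st.2 ++ [(i, i)])) st)
      = (fun (st : List Int × List (Int × Int)) (i : Int) =>
        ((PySem.List.pyRange 0 (PySem.List.pyGetD nums i 0)).foldl
          (fun lc h => PySem.List.pySetD lc h (PySem.List.pyGetD lc h 0 + 1)) st.1,
         (PySem.List.pyRange 0 (PySem.List.pyGetD nums i 0)).foldl
          (fun out _ => out ++ [(i, i)]) st.2)) := by
    funext st i
    obtain ⟨a, b⟩ := st
    exact PySem.List.foldl_prod_mk
      (fun lc h => PySem.List.pySetD lc h (PySem.List.pyGetD lc h 0 + 1))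
      (fun out (_ : Int) => out ++ [(i, i)])
      (PySem.List.pyRange 0 (PySem.List.pyGetD nums i 0)) a b
  rw [hbody]
  exact PySem.List.foldl_prod_mk
    (fun lc i => (PySem.List.pyRange 0 (PySem.List.pyGetD nums i 0)).foldl
      (fun lc h => PySem.List.pySetD lc h (PySem.List.pyGetD lc h 0 + 1)) lc)
    (fun out (i : Int) => (PySem.List.pyRange 0 (PySem.List.pyGetD nums i 0)).foldl
      (fun out _ => out ++ [(i, i)]) out)
    (PySem.List.pyRange 0 n) lc0 []

-- ===== VERDICT (by name: the statement is the Claim_ definition above) =====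
theorem gravity_spec : Claim_equal_gravity := by
  unfold Claim_equal_gravity
  intro nums _
  unfold Spec_gravity gravity gravity_alt
  by_cases hn : ((nums.length : Int)) ≤ 1
  · rw [if_pos hn, if_pos hn]
  · rw [if_neg hn, if_neg hn]
    have hne : nums ≠ [] := by
      intro h; rw [h] at hn; simp at hn
    obtain ⟨m, hm⟩ : ∃ m, PySem.List.max? nums (fun x => x) = some m := by
      cases h : PySem.List.max? nums (fun x => x) with
      | none => exact absurd ((PySem.List.max?_eq_none_iff _ _).mp h) hne
      | some m => exact ⟨m, rfl⟩
    rw [hm]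
    simp only [Option.getD_some, PySem.List.pyRepeat_singleton]
    have hall : ∀ x ∈ nums, x ≤ ((m.toNat : Nat) : Int) := by
      intro x hx
      have := PySem.List.max?_isMax hm x hx
      simp only [] at this
      omega
    have hrep : (List.range m.toNat).map (fun _ => (0 : Int)) = List.replicate m.toNat 0 := by
      simp
    rw [← hrep, pv_prod_split]
    rw [PySem.List.foldl_pyRange_zero_pyGetD' nums 0
      (fun lc v => (PySem.List.pyRange 0 v).foldl
        (fun lc h => PySem.List.pySetD lc h (PySem.List.pyGetD lc h 0 + 1)) lc)
      ((List.range m.toNat).map (fun _ => (0 : Int)))]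
    rw [pv_phase1_lc nums m.toNat hall]
    have hr : PySem.List.pyRange 0 m = PySem.List.pyRange 0 ((m.toNat : Nat) : Int) := by
      by_cases h0 : 0 ≤ m
      · congr 1
        omega
      · rw [PySem.List.pyRange_one_eq_nil (by omega), PySem.List.pyRange_one_eq_nil (by omega)]
    rw [hr]
    have hlen : (PySem.List.sorted nums (fun x => x) false).length = nums.length :=
      PySem.List.length_sorted nums (fun x => x) false
    have hlev : pvLevels nums m.toNat
        = pvLevels (PySem.List.sorted nums (fun x => x) false) m.toNat := by
      unfold pvLevels
      apply List.map_congr_left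
      intro h _
      rw [(PySem.List.sorted_perm nums (fun x => x) false).countP_eq]
    rw [hlev]
    have hs : (PySem.List.sorted nums (fun x => x) false).Pairwise (· ≤ ·) := by
      simpa using PySem.List.sorted_pairwise nums (fun x => x)
    have helem : ∀ x ∈ PySem.List.sorted nums (fun x => x) false, x ≤ ((m.toNat : Nat) : Int) := by
      intro x hx
      exact hall x ((PySem.List.mem_sorted nums (fun x => x) false x).mp hx)
    have houter := pv_outer (PySem.List.sorted nums (fun x => x) false) m.toNat hs helem
      (PySem.List.sorted nums (fun x => x) false).length le_rfl
    rw [List.take_length] at houter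
    rw [hlen] at houter
    exact houter _
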